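-- pv_equiv track=rewrite | github.com/ace12358/WordSegmentation | src/new/ffnn_pointwise.py | make_BI_label
-- ===== SOURCE A (Python) =====
-- def make_BI_label(sent):
--     labels = list()
--     pre_label = None
--     pre_char = ' '
--     for char in sent:
--         if not char == ' ':
--             if pre_char == ' ':
--                 labels.append(0)
--                 pre_label = 0
--             elif not pre_char == ' ':
--                 labels.append(1)
--                 pre_label = 1
--         pre_char = char
--     return labels
-- ===== SOURCE B (Python) =====
-- def make_BI_label(sent):
--     labels = []
--     for tok in sent.split(' '):
--         if tok:
--             labels.append(0)
--             labels.extend(1 for _ in tok[1:])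
--     return labels
-- ===== Notes on version B (the rewrite author's own statement) =====
-- stated objective: simpler
-- what changed: Replaced the previous-char state machine with a tokenize-then-emit decomposition: split the sentence on single spaces and, for each non-empty token, emit 0 followed by a 1 per remaining character.
import Mathlib
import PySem

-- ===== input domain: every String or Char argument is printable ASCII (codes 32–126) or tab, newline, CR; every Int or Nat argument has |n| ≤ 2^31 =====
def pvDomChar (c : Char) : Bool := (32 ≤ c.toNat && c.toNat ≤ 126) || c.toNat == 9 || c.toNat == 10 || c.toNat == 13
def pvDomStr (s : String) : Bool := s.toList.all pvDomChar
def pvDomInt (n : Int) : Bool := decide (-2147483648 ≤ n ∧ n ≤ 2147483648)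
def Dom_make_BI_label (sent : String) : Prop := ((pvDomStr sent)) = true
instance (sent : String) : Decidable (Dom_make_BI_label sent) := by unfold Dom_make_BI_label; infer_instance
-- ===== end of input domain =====

-- B replaces A's previous-char state machine by split-on-space then emit 0/1s per token (objective: simpler).

-- ===== PORT A =====
-- state = (labels, pre_label, pre_char), exactly A's three variables
def make_BI_label (sent : String) : List Int :=
  (sent.toList.foldl
    (fun (st : List Int × Option Int × Char) char =>
      let (labels, pre_label, pre_char) := st
      if ¬ (char = ' ') then
        if pre_char = ' ' then (labels ++ [0], some 0, char)
        else (labels ++ [1], some 1, char)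
      else (labels, pre_label, char))
    ([], none, ' ')).1

-- ===== PORT B =====
-- sent.split(' ') ported as PySem.Chars.splitOn on the character list (sep = [' '] is non-empty)
def make_BI_label_alt (sent : String) : List Int :=
  (PySem.Chars.splitOn sent.toList [' ']).foldl
    (fun (labels : List Int) tok =>
      if ¬ tok.isEmpty then
        labels ++ [0] ++ (PySem.List.slice tok (some 1) none).map (fun _ => (1 : Int))
      else labels)
    []

-- ===== PRECONDITION & SPEC =====
def Spec_make_BI_label (sent : String) (out : List Int) : Prop := out = make_BI_label_alt sent
instance (sent : String) (out : List Int) : Decidable (Spec_make_BI_label sent out) := by unfold Spec_make_BI_label; infer_instance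

-- ===== CLAIM (what is proved, stated in full; the proofs are below) =====
def Claim_equal_make_BI_label : Prop := ∀ (sent : String), Dom_make_BI_label sent → Spec_make_BI_label sent (make_BI_label sent)

-- ===== LEMMAS AND PROOFS =====

-- per-char contribution of A's loop: inw = "previous char was not a space"
def pvRest (l : List Char) (inw : Bool) : List Int :=
  match l with
  | [] => []
  | c :: cs => if c = ' ' then pvRest cs false
               else (if inw then (1 : Int) else 0) :: pvRest cs true

def pvStep (st : List Int × Option Int × Char) (char : Char) : List Int × Option Int × Char :=
  let (labels, pre_label, pre_char) := st
  if ¬ (char = ' ') then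
    if pre_char = ' ' then (labels ++ [0], some 0, char)
    else (labels ++ [1], some 1, char)
  else (labels, pre_label, char)

theorem pvStep_space (ls : List Int) (pl : Option Int) (pre c : Char) (hc : c = ' ') :
    pvStep (ls, pl, pre) c = (ls, pl, c) := by simp [pvStep, hc]

theorem pvStep_word0 (ls : List Int) (pl : Option Int) (pre c : Char) (hc : ¬ c = ' ')
    (hp : pre = ' ') : pvStep (ls, pl, pre) c = (ls ++ [0], some 0, c) := by
  simp [pvStep, hc, hp]

theorem pvStep_word1 (ls : List Int) (pl : Option Int) (pre c : Char) (hc : ¬ c = ' ')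
    (hp : ¬ pre = ' ') : pvStep (ls, pl, pre) c = (ls ++ [1], some 1, c) := by
  simp [pvStep, hc, hp]

theorem pvA_foldl (l : List Char) (labels : List Int) (pl : Option Int) (pre : Char) :
    (l.foldl pvStep (labels, pl, pre)).1 = labels ++ pvRest l (¬ pre = ' ') := by
  induction l generalizing labels pl pre with
  | nil => simp [pvRest]
  | cons c cs ih =>
    rw [List.foldl_cons]
    by_cases hc : c = ' '
    · rw [pvStep_space _ _ _ _ hc, ih]
      simp [pvRest, hc]
    · by_cases hp : pre = ' '
      · rw [pvStep_word0 _ _ _ _ hc hp, ih]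
        simp [pvRest, hc, hp]
      · rw [pvStep_word1 _ _ _ _ hc hp, ih]
        simp [pvRest, hc, hp]

-- B's token fold equals flatMap of a per-token emitter
def pvEmit (tok : List Char) : List Int :=
  if ¬ tok.isEmpty then [0] ++ (PySem.List.slice tok (some 1) none).map (fun _ => (1 : Int))
  else []

theorem pvB_foldl (toks : List (List Char)) (labels : List Int) :
    (toks.foldl
      (fun (labels : List Int) tok =>
        if ¬ tok.isEmpty then
          labels ++ [0] ++ (PySem.List.slice tok (some 1) none).map (fun _ => (1 : Int))
        else labels)
      labels) = labels ++ toks.flatMap pvEmit := by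
  induction toks generalizing labels with
  | nil => simp
  | cons t ts ih =>
    rw [List.foldl_cons, ih]
    cases t <;> simp [pvEmit]

theorem pvEmit_eq (tok : List Char) :
    pvEmit tok = if tok = [] then [] else 0 :: List.replicate (tok.length - 1) 1 := by
  cases tok with
  | nil => simp [pvEmit]
  | cons c cs =>
    simp [pvEmit, PySem.List.slice, List.map_const']

-- the simple recursion PySem.Chars.splitOn.go computes for the single-char sep [' ']
def pvSp (l : List Char) (cur : List Char) : List (List Char) :=
  match l with
  | [] => [cur.reverse]
  | c :: cs => if c = ' ' then cur.reverse :: pvSp cs [] else pvSp cs (c :: cur)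

theorem pvGo_eq (l : List Char) (fuel : Nat) (cur : List Char) (acc : List (List Char))
    (h : l.length ≤ fuel) :
    PySem.Chars.splitOn.go [' '] fuel l cur acc = acc.reverse ++ pvSp l cur := by
  induction l generalizing fuel cur acc with
  | nil =>
    cases fuel <;> simp [PySem.Chars.splitOn.go, pvSp]
  | cons c cs ih =>
    cases fuel with
    | zero => simp at h
    | succ fuel =>
      by_cases hc : c = ' '
      · subst hc
        simp only [PySem.Chars.splitOn.go, List.isPrefixOf, pvSp]
        rw [if_pos (by simp)]
        simp only [List.length_cons] at h
        rw [show List.drop [' '].length (' ' :: cs) = cs from rfl,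
            ih fuel [] ((cur.reverse) :: acc) (by omega)]
        simp [pvSp]
      · simp only [PySem.Chars.splitOn.go, pvSp]
        rw [if_neg (by simp [List.isPrefixOf]; exact fun h => hc h.symm)]
        simp only [List.length_cons] at h
        rw [ih fuel (c :: cur) acc (by omega)]
        simp [pvSp, hc]

-- the heart: flattening the emitted tokens equals A's per-char labels
theorem pvKey (l : List Char) (cur : List Char) :
    (pvSp l cur).flatMap pvEmit =
      (if cur = [] then [] else 0 :: List.replicate (cur.length - 1) 1) ++ pvRest l (¬ cur = []) := by
  induction l generalizing cur with
  | nil => simp [pvSp, pvEmit_eq, pvRest]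
  | cons c cs ih =>
    by_cases hc : c = ' '
    · subst hc
      simp only [pvSp, pvRest, if_true, decide_true, List.flatMap_cons]
      rw [ih, pvEmit_eq]
      cases cur <;> simp
    · cases cur with
      | nil =>
        simp only [pvSp, if_neg hc, ih, pvRest]
        simp [hc]
      | cons d ds =>
        simp only [pvSp, if_neg hc, ih, pvRest]
        simp only [List.length_cons, List.cons_ne_self, reduceCtorEq, if_neg, if_false,
          Nat.add_sub_cancel, hc, ite_false]
        have : List.replicate (ds.length + 1) (1 : Int)
            = List.replicate ds.length 1 ++ [1] := by
          simp [List.replicate_succ']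
        simp [this, hc, pvRest]

-- ===== VERDICT (by name: the statement is the Claim_ definition above) =====
theorem make_BI_label_spec : Claim_equal_make_BI_label := by
  intro sent _
  unfold Spec_make_BI_label make_BI_label make_BI_label_alt PySem.Chars.splitOn
  rw [show (fun (st : List Int × Option Int × Char) char =>
      let (labels, pre_label, pre_char) := st
      if ¬ (char = ' ') then
        if pre_char = ' ' then (labels ++ [0], some 0, char)
        else (labels ++ [1], some 1, char)
      else (labels, pre_label, char)) = pvStep from rfl]
  rw [pvA_foldl, pvB_foldl, pvGo_eq _ _ _ _ (by omega)]
  simp only [List.reverse_nil, List.nil_append, pvKey]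
  simp
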